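-- pv_equiv track=rewrite | github.com/Razpines/reels_factory | src/reels_factory/ingest.py | _clean_post_body
-- ===== SOURCE A (Python) =====
-- def _clean_post_body(text: str) -> str:
--     """
--     Trim common edit/update sections that distract from narration.
--     """
--     parts = [
--         "Edit: ",
--         "EDIT",
--         "update",
--         "Update",
--         "UPDATE",
--         "edit",
--         "update,",
--         "update:",
--     ]
--     for token in parts:
--         if token in text:
--             text = text.split(token)[0]
--     return text
-- ===== SOURCE B (Python) =====
-- def _clean_post_body(text: str) -> str:
--     """
--     Trim common edit/update sections that distract from narration.
--
--     Computes the earliest position at which any marker occurs (one find per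
--     marker, no repeated splitting), then cuts once at that position.
--     """
--     parts = [
--         "Edit: ",
--         "EDIT",
--         "update",
--         "Update",
--         "UPDATE",
--         "edit",
--         "update,",
--         "update:",
--     ]
--     best = -1
--     for token in parts:
--         i = text.find(token)
--         if i != -1 and (best == -1 or i < best):
--             best = i
--     return text if best == -1 else text[:best]
-- ===== Notes on version B (the rewrite author's own statement) =====
-- stated objective: simpler
-- what changed: Instead of eight rounds of split-and-reassign that repeatedly rescan and rebuild the text, B makes one pass over the marker list computing the minimal first-occurrence index and performs a single slice.
-- intended difference: On texts whose earliest marker is 'UPDATE' immediately followed by an overlapping 'Edit: ' or 'EDIT' (sharing the final 'E', e.g. 'UPDATEdit: x') and no marker occurs earlier, A first cuts at the overlapped 'Edit: '/'EDIT' and leaves the dangling fragment ending in 'UPDAT', while B cuts at the earliest marker and removes the whole section, which is the intended trimming. — e.g. on _clean_post_body("UPDATEdit: x"): A returns "UPDAT", B returns ""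
import Mathlib
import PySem

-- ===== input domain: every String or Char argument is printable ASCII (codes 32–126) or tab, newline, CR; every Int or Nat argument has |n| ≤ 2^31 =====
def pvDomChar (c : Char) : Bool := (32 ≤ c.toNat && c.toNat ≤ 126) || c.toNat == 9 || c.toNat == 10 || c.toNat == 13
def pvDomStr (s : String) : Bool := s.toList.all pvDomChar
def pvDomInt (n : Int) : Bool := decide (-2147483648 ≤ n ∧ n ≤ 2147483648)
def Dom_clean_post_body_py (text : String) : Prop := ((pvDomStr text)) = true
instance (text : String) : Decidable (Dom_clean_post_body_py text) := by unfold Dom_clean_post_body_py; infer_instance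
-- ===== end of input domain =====

-- B replaces A's eight rounds of split-and-reassign by one pass computing the minimal
-- first-occurrence index of the markers followed by a single slice (objective: simpler).

-- the marker list both implementations use
def pvParts : List String := ["Edit: ", "EDIT", "update", "Update", "UPDATE", "edit", "update,", "update:"]

-- ===== PORT A =====
def clean_post_body_py (text : String) : String :=
  pvParts.foldl
    (fun s token =>
      if PySem.Str.isIn token s then
        -- text.split(token)[0]: split? is none only for token = "" and [0] never misses
        -- (split always returns a nonempty list), so the getD defaults are unreachable
        (PySem.List.pyGet? ((PySem.Str.split? s token).getD []) 0).getD s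
      else s)
    text

-- ===== PORT B =====
def clean_post_body_py_alt (text : String) : String :=
  let best := pvParts.foldl
    (fun best token =>
      let i := PySem.Str.find text token
      if i ≠ -1 ∧ (best = -1 ∨ i < best) then i else best) (-1)
  if best = -1 then text else PySem.Str.slice text none (some best)

-- ===== PRECONDITION & SPEC =====
-- On texts whose earliest marker is "UPDATE" immediately followed by an overlapping
-- "Edit: " or "EDIT" (sharing the final 'E', e.g. "UPDATEdit: x") and no marker occurring
-- earlier, A first cuts at the overlapped "Edit: "/"EDIT" and leaves the dangling fragment
-- ending in "UPDAT", while B cuts at the earliest marker and removes the whole section,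
-- which is the intended trimming.
def D_clean_post_body_py (text : String) : Prop :=
  0 ≤ PySem.Str.find text "UPDATE" ∧
  (PySem.Str.startswith (PySem.Str.slice text (some (PySem.Str.find text "UPDATE" + 5)) none) "Edit: " = true ∨
   PySem.Str.startswith (PySem.Str.slice text (some (PySem.Str.find text "UPDATE" + 5)) none) "EDIT" = true) ∧
  (∀ t ∈ pvParts, PySem.Str.find text t = -1 ∨ PySem.Str.find text "UPDATE" ≤ PySem.Str.find text t)
instance (text : String) : Decidable (D_clean_post_body_py text) := by unfold D_clean_post_body_py; infer_instance

def Spec_clean_post_body_py (text : String) (out : String) : Prop :=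
  ¬ D_clean_post_body_py text → out = clean_post_body_py_alt text
instance (text : String) (out : String) : Decidable (Spec_clean_post_body_py text out) := by unfold Spec_clean_post_body_py; infer_instance

def pvDiffWitness_clean_post_body_py : String := "UPDATEdit: x"
def pvDiffWitnessOut_clean_post_body_py : String × String := ("UPDAT", "")

-- ===== CLAIM (what is proved, stated in full; the proofs are below) =====
def Claim_unchanged_clean_post_body_py : Prop := ∀ (text : String), Dom_clean_post_body_py text → Spec_clean_post_body_py text (clean_post_body_py text)
def Claim_changed_clean_post_body_py : Prop := Dom_clean_post_body_py (pvDiffWitness_clean_post_body_py) ∧ D_clean_post_body_py (pvDiffWitness_clean_post_body_py) ∧ clean_post_body_py (pvDiffWitness_clean_post_body_py) = pvDiffWitnessOut_clean_post_body_py.1 ∧ clean_post_body_py_alt (pvDiffWitness_clean_post_body_py) = pvDiffWitnessOut_clean_post_body_py.2 ∧ pvDiffWitnessOut_clean_post_body_py.1 ≠ pvDiffWitnessOut_clean_post_body_py.2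
def Claim_exact_clean_post_body_py : Prop := ∀ (text : String), Dom_clean_post_body_py text → D_clean_post_body_py text → clean_post_body_py text ≠ clean_post_body_py_alt text

-- ===== LEMMAS AND PROOFS =====

lemma pv_infix_iff (t cs : List Char) : t <:+: cs ↔ ∃ j, t <+: cs.drop j := by
  constructor
  · intro h
    have := (PySem.Chars.exists_prefix_drop_iff_isIn t cs).mpr ((PySem.Chars.isIn_iff_infix t cs).mpr h)
    exact this
  · intro ⟨j, hj⟩
    exact (PySem.Chars.isIn_iff_infix t cs).mp ((PySem.Chars.exists_prefix_drop_iff_isIn t cs).mp ⟨j, hj⟩)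

lemma pv_find_nonneg {cs t : List Char} {j : Nat} (h : t <+: cs.drop j) : 0 ≤ PySem.Chars.find cs t :=
  (PySem.Chars.find_nonneg_iff cs t).mpr ((pv_infix_iff t cs).mpr ⟨j, h⟩)

lemma pv_find_le {cs t : List Char} {j : Nat} (h : t <+: cs.drop j) : PySem.Chars.find cs t ≤ (j : Int) := by
  have h0 := pv_find_nonneg h
  have hs := PySem.Chars.find_spec h0
  by_contra hlt
  push_neg at hlt
  have : j < (PySem.Chars.find cs t).toNat := by omega
  exact hs.2 j this h

lemma pv_find_eq {cs t : List Char} {k : Nat} (h : t <+: cs.drop k)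
    (hmin : ∀ i < k, ¬ t <+: cs.drop i) : PySem.Chars.find cs t = (k : Int) := by
  have h0 := pv_find_nonneg h
  have hs := PySem.Chars.find_spec h0
  have hle := pv_find_le h
  rcases lt_trichotomy (PySem.Chars.find cs t).toNat k with hlt | heq | hgt
  · exact absurd hs.1 (hmin _ hlt)
  · omega
  · omega

def pvPiece (cs t : List Char) : List Char :=
  if PySem.Chars.isIn t cs then cs.take (PySem.Chars.find cs t).toNat else cs

lemma pvPiece_of_prefix {cs t : List Char} (h : t <+: cs) : pvPiece cs t = [] := by
  have hf : PySem.Chars.find cs t = (0 : Int) := by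
    have := pv_find_eq (k := 0) (by simpa using h) (by omega)
    simpa using this
  unfold pvPiece
  rw [if_pos ((PySem.Chars.isIn_iff_infix t cs).mpr ((pv_infix_iff t cs).mpr ⟨0, by simpa using h⟩))]
  simp [hf]

lemma pvPiece_cons {c : Char} {rest t : List Char} (hnp : ¬ t <+: (c :: rest)) :
    pvPiece (c :: rest) t = c :: pvPiece rest t := by
  by_cases hin : PySem.Chars.isIn t rest = true
  · have hinf : t <:+: rest := (PySem.Chars.isIn_iff_infix t rest).mp hin
    obtain ⟨k, hk⟩ := (pv_infix_iff t rest).mp hinf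
    have h0r := pv_find_nonneg hk
    have hsr := PySem.Chars.find_spec h0r
    have hfr : PySem.Chars.find (c :: rest) t = ((PySem.Chars.find rest t).toNat + 1 : Nat) := by
      apply pv_find_eq
      · simpa using hsr.1
      · intro i hi
        match i with
        | 0 => simpa using hnp
        | (i+1) =>
          intro hpre
          exact hsr.2 i (by omega) (by simpa using hpre)
    have hinc : PySem.Chars.isIn t (c :: rest) = true := by
      rw [PySem.Chars.isIn_iff_infix]
      exact (pv_infix_iff _ _).mpr ⟨(PySem.Chars.find rest t).toNat + 1, by simpa using hsr.1⟩
    unfold pvPiece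
    rw [if_pos hinc, if_pos hin, hfr]
    simp only [Int.toNat_natCast, List.take_succ_cons]
  · have hninf : ¬ t <:+: (c :: rest) := by
      intro hinf
      obtain ⟨j, hj⟩ := (pv_infix_iff _ _).mp hinf
      match j with
      | 0 => exact hnp (by simpa using hj)
      | (j+1) =>
        exact hin ((PySem.Chars.isIn_iff_infix t rest).mpr ((pv_infix_iff _ _).mpr ⟨j, by simpa using hj⟩))
    unfold pvPiece
    rw [if_neg (by simp only [PySem.Chars.isIn_iff_infix]; exact fun h => hninf h),
        if_neg (by simpa using hin)]

lemma pv_go_head (t : List Char) (ht : t ≠ []) :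
    ∀ fuel (l cur : List Char) (accs : List (List Char)), l.length < fuel →
      ∃ r, PySem.Chars.splitOn.go t fuel l cur accs = accs.reverse ++ (cur.reverse ++ pvPiece l t) :: r := by
  intro fuel
  induction fuel with
  | zero => intro l cur accs h; omega
  | succ fuel ih =>
    intro l cur accs h
    match l with
    | [] =>
      refine ⟨[], ?_⟩
      rw [PySem.Chars.splitOn.go.eq_def]
      have hp : pvPiece [] t = [] := by
        unfold pvPiece
        rw [if_neg]
        intro hin
        obtain ⟨j, hj⟩ := (pv_infix_iff t []).mp ((PySem.Chars.isIn_iff_infix t []).mp hin)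
        simp at hj
        exact ht hj
      simp [hp]
    | c :: rest =>
      rw [PySem.Chars.splitOn.go.eq_def]
      by_cases hpre : t.isPrefixOf (c :: rest) = true
      · simp only [hpre, if_true]
        have hlen : ((c :: rest).drop t.length).length < fuel := by
          have h1 : 1 ≤ t.length := by
            cases t with
            | nil => exact absurd rfl ht
            | cons a b => simp
          simp only [List.length_drop, List.length_cons] at *
          omega
        obtain ⟨r, hr⟩ := ih ((c :: rest).drop t.length) [] (cur.reverse :: accs) hlen
        refine ⟨pvPiece ((c :: rest).drop t.length) t :: r, ?_⟩
        rw [hr, pvPiece_of_prefix (List.isPrefixOf_iff_prefix.mp hpre)]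
        simp
      · simp only [hpre, if_false]
        have hlen : rest.length < fuel := by simp at h; omega
        obtain ⟨r, hr⟩ := ih rest (c :: cur) accs hlen
        refine ⟨r, ?_⟩
        rw [hr, pvPiece_cons (fun hp => hpre (List.isPrefixOf_iff_prefix.mpr hp))]
        simp

lemma pv_splitOn_head (cs t : List Char) (ht : t ≠ []) :
    ∃ r, PySem.Chars.splitOn cs t = pvPiece cs t :: r := by
  obtain ⟨r, hr⟩ := pv_go_head t ht (cs.length + 1) cs [] [] (by omega)
  refine ⟨r, ?_⟩
  unfold PySem.Chars.splitOn
  rw [hr]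
  simp

lemma pv_prefix_drop_len {t cs : List Char} {j : Nat} (h : t <+: cs.drop j) (ht : t ≠ []) :
    j + t.length ≤ cs.length := by
  have h1 := h.length_le
  rw [List.length_drop] at h1
  have h2 := List.length_pos_of_ne_nil ht
  omega

-- ---- A's step at the character level: piece of a prefix is a prefix cut at pvNxt ----

def pvNxt (cs t : List Char) (m : Nat) : Nat :=
  if PySem.Chars.isIn t cs = true ∧ (PySem.Chars.find cs t).toNat + t.length ≤ m
  then (PySem.Chars.find cs t).toNat else m

def pvEff (cs t : List Char) : Nat :=
  if PySem.Chars.isIn t cs = true then (PySem.Chars.find cs t).toNat else cs.length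

lemma pv_prefix_take_iff {cs t : List Char} (ht : t ≠ []) {m j : Nat} :
    t <+: (cs.take m).drop j ↔ (t <+: cs.drop j ∧ j + t.length ≤ m) := by
  have htl := List.length_pos_of_ne_nil ht
  rw [List.drop_take, List.prefix_take_iff]
  constructor
  · rintro ⟨h1, h2⟩; exact ⟨h1, by omega⟩
  · rintro ⟨h1, h2⟩; exact ⟨h1, by omega⟩

lemma pv_stepTake (cs t : List Char) (ht : t ≠ []) {m : Nat} (hm : m ≤ cs.length) :
    pvPiece (cs.take m) t = cs.take (pvNxt cs t m) := by
  have htl := List.length_pos_of_ne_nil ht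
  unfold pvNxt
  by_cases hc : PySem.Chars.isIn t cs = true ∧ (PySem.Chars.find cs t).toNat + t.length ≤ m
  · rw [if_pos hc]
    obtain ⟨hin, hfit⟩ := hc
    have h0 : 0 ≤ PySem.Chars.find cs t :=
      (PySem.Chars.find_nonneg_iff cs t).mpr ((PySem.Chars.isIn_iff_infix t cs).mp hin)
    have hs := PySem.Chars.find_spec h0
    have hocc : t <+: (cs.take m).drop (PySem.Chars.find cs t).toNat :=
      (pv_prefix_take_iff ht).mpr ⟨hs.1, hfit⟩
    have hinP : PySem.Chars.isIn t (cs.take m) = true :=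
      (PySem.Chars.isIn_iff_infix _ _).mpr ((pv_infix_iff _ _).mpr ⟨_, hocc⟩)
    have hfp : PySem.Chars.find (cs.take m) t = ((PySem.Chars.find cs t).toNat : Int) :=
      pv_find_eq hocc (fun i hi hp => hs.2 i hi ((pv_prefix_take_iff ht).mp hp).1)
    unfold pvPiece
    rw [if_pos hinP, hfp]
    simp only [Int.toNat_natCast, List.take_take]
    congr 1
    omega
  · rw [if_neg hc]
    have hni : PySem.Chars.isIn t (cs.take m) = false := by
      rw [PySem.Chars.isIn_eq_false_iff]
      intro hinf
      obtain ⟨j, hj⟩ := (pv_infix_iff _ _).mp hinf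
      obtain ⟨h1, h2⟩ := (pv_prefix_take_iff ht).mp hj
      have hin : PySem.Chars.isIn t cs = true :=
        (PySem.Chars.isIn_iff_infix t cs).mpr ((pv_infix_iff t cs).mpr ⟨j, h1⟩)
      have hle := pv_find_le h1
      have h0 : 0 ≤ PySem.Chars.find cs t :=
        (PySem.Chars.find_nonneg_iff cs t).mpr ((PySem.Chars.isIn_iff_infix t cs).mp hin)
      exact hc ⟨hin, by omega⟩
    unfold pvPiece
    rw [if_neg (by simp [hni])]

lemma pv_nxt_le_len {cs t : List Char} {m : Nat} (hm : m ≤ cs.length) : pvNxt cs t m ≤ cs.length := by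
  unfold pvNxt
  split_ifs with h
  · have := PySem.Chars.find_le_length cs t
    omega
  · exact hm

-- ---- bridge: A's string-level step equals pvPiece on toList ----

lemma pv_stepA (s token : String) (hne : token ≠ "") :
    (if PySem.Str.isIn token s then
        (PySem.List.pyGet? ((PySem.Str.split? s token).getD []) 0).getD s
      else s).toList = pvPiece s.toList token.toList := by
  have hsep : token.toList ≠ [] := by
    intro hh; exact hne (String.toList_inj.mp (by simpa using hh))
  by_cases h : PySem.Str.isIn token s = true
  · rw [if_pos h]
    have hsp := PySem.Str.split?_map s token
    rw [show PySem.Chars.split? s.toList token.toList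
          = some (PySem.Chars.splitOn s.toList token.toList) from by
        unfold PySem.Chars.split?; rw [if_neg (by simpa [List.isEmpty_iff] using hsep)]] at hsp
    obtain ⟨r, hr⟩ := pv_splitOn_head s.toList token.toList hsep
    rw [hr] at hsp
    cases hL : PySem.Str.split? s token with
    | none => rw [hL] at hsp; simp at hsp
    | some L =>
      rw [hL] at hsp
      cases L with
      | nil => simp at hsp
      | cons x xs =>
        simp only [Option.map_some, List.map_cons, Option.some_inj, List.cons_eq_cons] at hsp
        rw [show ((some (x :: xs) : Option (List String)).getD []) = x :: xs from rfl,
          show PySem.List.pyGet? (x :: xs) (0:Int) = some x from by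
            simp [PySem.List.pyGet?, PySem.List.pyIdx?]]
        simpa using hsp.1
  · rw [if_neg h]
    unfold pvPiece
    rw [if_neg (by simpa using h)]

-- ---- run A's fold over the marker list on a prefix state ----

lemma pv_foldA (cs : List Char) (toks : List String) (hne : ∀ x ∈ toks, x ≠ "") :
    ∀ (s : String) (m : Nat), m ≤ cs.length → s.toList = cs.take m →
      (toks.foldl (fun s token =>
          if PySem.Str.isIn token s then
            (PySem.List.pyGet? ((PySem.Str.split? s token).getD []) 0).getD s
          else s) s).toList
        = cs.take ((toks.map String.toList).foldl (fun m t => pvNxt cs t m) m) := by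
  induction toks with
  | nil => intro s m hm hs; simpa using hs
  | cons tok toks ih =>
    intro s m hm hs
    have htne : tok ≠ "" := hne tok (by simp)
    have hstep : (if PySem.Str.isIn tok s then
            (PySem.List.pyGet? ((PySem.Str.split? s tok).getD []) 0).getD s
          else s).toList = cs.take (pvNxt cs tok.toList m) := by
      rw [pv_stepA s tok htne, hs]
      exact pv_stepTake cs tok.toList (by intro hh; exact htne (String.toList_inj.mp (by simpa using hh))) hm
    simp only [List.foldl_cons, List.map_cons]
    exact ih (fun x hx => hne x (by simp [hx])) _ (pvNxt cs tok.toList m) (pv_nxt_le_len hm) hstep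

-- ---- min-fold algebra ----

lemma pv_foldmin_shift (cs : List Char) (ts : List (List Char)) :
    ∀ a b : Nat, ts.foldl (fun m t => min m (pvEff cs t)) (min a b)
      = min a (ts.foldl (fun m t => min m (pvEff cs t)) b) := by
  induction ts with
  | nil => intro a b; rfl
  | cons t ts ih =>
    intro a b
    simp only [List.foldl_cons]
    rw [min_assoc, ih]

lemma pv_foldmin_le_init (cs : List Char) (ts : List (List Char)) (a : Nat) :
    ts.foldl (fun m t => min m (pvEff cs t)) a ≤ a := by
  induction ts generalizing a with
  | nil => simp
  | cons t ts ih =>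
    simp only [List.foldl_cons]
    exact le_trans (ih _) (by omega)

lemma pv_foldmin_le_mem (cs : List Char) {ts : List (List Char)} {t : List Char} (ht : t ∈ ts) (a : Nat) :
    ts.foldl (fun m t => min m (pvEff cs t)) a ≤ pvEff cs t := by
  induction ts generalizing a with
  | nil => simp at ht
  | cons u ts ih =>
    simp only [List.foldl_cons]
    rcases List.mem_cons.mp ht with h | h
    · subst h
      exact le_trans (pv_foldmin_le_init cs ts _) (by omega)
    · exact ih h _

lemma pv_foldmin_ge (cs : List Char) {ts : List (List Char)} {c a : Nat} (ha : c ≤ a)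
    (h : ∀ t ∈ ts, c ≤ pvEff cs t) :
    c ≤ ts.foldl (fun m t => min m (pvEff cs t)) a := by
  induction ts generalizing a with
  | nil => simpa using ha
  | cons t ts ih =>
    simp only [List.foldl_cons]
    exact ih (by have := h t (by simp); omega) (fun u hu => h u (by simp [hu]))

-- ---- crossing analysis ----

abbrev pvNoCross (w t : List Char) : Prop :=
  ∀ k < t.length, 0 < k → ¬(t.drop k <+: w) ∧ ¬(w <+: t.drop k)

lemma pv_nxt_notstuck (cs t : List Char) (ht : t ≠ []) {m : Nat} (hm : m ≤ cs.length)
    (hns : ¬(PySem.Chars.isIn t cs = true ∧ (PySem.Chars.find cs t).toNat < m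
              ∧ m < (PySem.Chars.find cs t).toNat + t.length)) :
    pvNxt cs t m = min m (pvEff cs t) := by
  have htl := List.length_pos_of_ne_nil ht
  unfold pvNxt pvEff
  by_cases hin : PySem.Chars.isIn t cs = true
  · simp only [hin, true_and, if_true]
    have h3 : ¬((PySem.Chars.find cs t).toNat < m ∧ m < (PySem.Chars.find cs t).toNat + t.length) := by
      intro hx; exact hns ⟨hin, hx⟩
    split_ifs with h
    · omega
    · omega
  · simp only [hin, false_and, if_false, Bool.false_eq_true]
    omega

lemma pv_nxt_inv (cs t : List Char) {m : Nat} (W : List (List Char))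
    (hinv : m = cs.length ∨ ∃ w ∈ W, w <+: cs.drop m) :
    pvNxt cs t m = cs.length ∨ ∃ w ∈ W ++ [t], w <+: cs.drop (pvNxt cs t m) := by
  unfold pvNxt
  split_ifs with h
  · right
    refine ⟨t, by simp, ?_⟩
    have h0 : 0 ≤ PySem.Chars.find cs t :=
      (PySem.Chars.find_nonneg_iff cs t).mpr ((PySem.Chars.isIn_iff_infix t cs).mp h.1)
    exact (PySem.Chars.find_spec h0).1
  · rcases hinv with h1 | ⟨w, hw1, hw2⟩
    · exact Or.inl h1
    · exact Or.inr ⟨w, by simp [hw1], hw2⟩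

lemma pv_nxt_stuck_refute (cs t : List Char) (ht : t ≠ []) {m : Nat} (W : List (List Char))
    (hinv : m = cs.length ∨ ∃ w ∈ W, w <+: cs.drop m)
    (hnc : ∀ w ∈ W, pvNoCross w t) :
    ¬(PySem.Chars.isIn t cs = true ∧ (PySem.Chars.find cs t).toNat < m
        ∧ m < (PySem.Chars.find cs t).toNat + t.length) := by
  rintro ⟨hin, h1, h2⟩
  have h0 : 0 ≤ PySem.Chars.find cs t :=
    (PySem.Chars.find_nonneg_iff cs t).mpr ((PySem.Chars.isIn_iff_infix t cs).mp hin)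
  have hs := PySem.Chars.find_spec h0
  set F := (PySem.Chars.find cs t).toNat with hF
  rcases hinv with hlen | ⟨w, hw1, hw2⟩
  · have := pv_prefix_drop_len hs.1 ht
    omega
  · have hdk : t.drop (m - F) <+: cs.drop m := by
      have := hs.1.drop (m - F)
      rwa [List.drop_drop, show F + (m - F) = m by omega] at this
    rcases List.prefix_or_prefix_of_prefix hdk hw2 with hor | hor
    · exact (hnc w hw1 (m - F) (by omega) (by omega)).1 hor
    · exact (hnc w hw1 (m - F) (by omega) (by omega)).2 hor

lemma pv_run (cs : List Char) :
    ∀ (ts W : List (List Char)) (m : Nat), m ≤ cs.length →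
      (∀ t ∈ ts, t ≠ []) →
      (m = cs.length ∨ ∃ w ∈ W, w <+: cs.drop m) →
      (∀ t ∈ ts, ∀ w ∈ W ++ ts, pvNoCross w t) →
      ts.foldl (fun m t => pvNxt cs t m) m = ts.foldl (fun m t => min m (pvEff cs t)) m
      ∧ ts.foldl (fun m t => pvNxt cs t m) m ≤ cs.length
      ∧ (ts.foldl (fun m t => pvNxt cs t m) m = cs.length
          ∨ ∃ w ∈ W ++ ts, w <+: cs.drop (ts.foldl (fun m t => pvNxt cs t m) m)) := by
  intro ts
  induction ts with
  | nil =>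
    intro W m hm hne hinv hnc
    refine ⟨rfl, by simpa using hm, ?_⟩
    simpa using hinv
  | cons t ts ih =>
    intro W m hm hne hinv hnc
    have htne : t ≠ [] := hne t (by simp)
    have hns := pv_nxt_stuck_refute cs t htne W hinv
      (fun w hw => hnc t (by simp) w (by simp [hw]))
    have hstep := pv_nxt_notstuck cs t htne hm hns
    have hm' : pvNxt cs t m ≤ cs.length := pv_nxt_le_len hm
    have hinv' := pv_nxt_inv cs t W hinv
    have hnc' : ∀ u ∈ ts, ∀ w ∈ (W ++ [t]) ++ ts, pvNoCross w u := by
      intro u hu w hw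
      apply hnc u (by simp [hu]) w
      simp only [List.mem_append, List.mem_cons, List.mem_singleton] at hw ⊢
      tauto
    obtain ⟨he, hle, hi⟩ := ih (W ++ [t]) (pvNxt cs t m) hm' (fun u hu => hne u (by simp [hu])) hinv' hnc'
    refine ⟨?_, ?_, ?_⟩
    · simp only [List.foldl_cons]
      rw [he, hstep]
    · simpa using hle
    · simp only [List.foldl_cons]
      rcases hi with h1 | ⟨w, hw1, hw2⟩
      · exact Or.inl h1
      · refine Or.inr ⟨w, ?_, hw2⟩
        simp only [List.mem_append, List.mem_cons, List.mem_singleton] at hw1 ⊢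
        tauto

-- ---- B's fold: the minimal first-occurrence index ----

lemma pv_best_spec (cs : List Char) (ts : List (List Char)) (hne : ∀ t ∈ ts, t ≠ []) :
    (ts.foldl (fun b t =>
        if PySem.Chars.find cs t ≠ -1 ∧ (b = -1 ∨ PySem.Chars.find cs t < b) then PySem.Chars.find cs t else b) (-1) = -1
      ∧ ts.foldl (fun m t => min m (pvEff cs t)) cs.length = cs.length)
    ∨ (0 ≤ ts.foldl (fun b t =>
        if PySem.Chars.find cs t ≠ -1 ∧ (b = -1 ∨ PySem.Chars.find cs t < b) then PySem.Chars.find cs t else b) (-1)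
      ∧ ts.foldl (fun m t => min m (pvEff cs t)) cs.length
          = (ts.foldl (fun b t =>
              if PySem.Chars.find cs t ≠ -1 ∧ (b = -1 ∨ PySem.Chars.find cs t < b) then PySem.Chars.find cs t else b) (-1)).toNat) := by
  induction ts using List.reverseRecOn with
  | nil => left; exact ⟨rfl, rfl⟩
  | append_singleton ts t ih =>
    have htne : t ≠ [] := hne t (by simp)
    have hmm_le := pv_foldmin_le_init cs ts cs.length
    simp only [List.foldl_append, List.foldl_cons, List.foldl_nil]
    by_cases hin : PySem.Chars.isIn t cs = true
    · have hinf := (PySem.Chars.isIn_iff_infix t cs).mp hin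
      have hf0 : 0 ≤ PySem.Chars.find cs t := (PySem.Chars.find_nonneg_iff cs t).mpr hinf
      have hfne : PySem.Chars.find cs t ≠ -1 := by omega
      have hfl := PySem.Chars.find_le_length cs t
      have heff : pvEff cs t = (PySem.Chars.find cs t).toNat := by unfold pvEff; rw [if_pos hin]
      rcases ih (fun u hu => hne u (by simp [hu])) with ⟨hb, hm⟩ | ⟨hb, hm⟩
      · rw [hb, hm, heff]
        right
        rw [if_pos ⟨hfne, Or.inl rfl⟩]
        constructor
        · exact hf0
        · omega
      · rw [hm, heff]
        by_cases hlt : PySem.Chars.find cs t <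
            ts.foldl (fun b t =>
              if PySem.Chars.find cs t ≠ -1 ∧ (b = -1 ∨ PySem.Chars.find cs t < b) then PySem.Chars.find cs t else b) (-1)
        · rw [if_pos ⟨hfne, Or.inr hlt⟩]
          right
          refine ⟨hf0, by omega⟩
        · rw [if_neg (by rintro ⟨-, h | h⟩; omega; omega)]
          right
          refine ⟨hb, by omega⟩
    · have hfe : PySem.Chars.find cs t = -1 := by
        rw [PySem.Chars.find_eq_neg_one_iff]
        intro hinf
        rw [(PySem.Chars.isIn_iff_infix t cs).mpr hinf] at hin
        exact hin rfl
      have heff : pvEff cs t = cs.length := by unfold pvEff; rw [if_neg (by simp [hin])]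
      rw [if_neg (by rintro ⟨h, -⟩; exact h hfe), heff]
      rcases ih (fun u hu => hne u (by simp [hu])) with ⟨hb, hm⟩ | ⟨hb, hm⟩
      · left; exact ⟨hb, by rw [hm]; omega⟩
      · right; refine ⟨hb, by rw [hm]; omega⟩

-- ---- character clashes inside an "UPDATE" occurrence ----

lemma pv_occ_chars {cs w : List Char} {q i : Nat} (hU : "UPDATE".toList <+: cs.drop q)
    (hw : w <+: cs.drop (q + i)) :
    ∀ r, r < w.length → i + r < 6 → w[r]? = ("UPDATE".toList)[i + r]? := by
  intro r hr hir
  obtain ⟨u, hu⟩ := hU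
  obtain ⟨v, hv⟩ := hw
  have h1 : cs[q + (i + r)]? = ("UPDATE".toList)[i + r]? := by
    rw [← List.getElem?_drop, ← hu, List.getElem?_append_left (by simpa using hir)]
  have h2 : cs[q + i + r]? = w[r]? := by
    rw [← List.getElem?_drop, ← hv, List.getElem?_append_left hr]
  rw [← h2, show q + i + r = q + (i + r) by omega, h1]

lemma pv_no_occ {cs w : List Char} {q j b : Nat} (hU : "UPDATE".toList <+: cs.drop q)
    (hw : w <+: cs.drop j) (hq : q ≤ j) (hj : j < q + b) (hb : b ≤ 6)
    (hbad : ∀ i < b, ¬(∀ r, r < w.length → i + r < 6 → w[r]? = ("UPDATE".toList)[i + r]?)) :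
    False := by
  have hji : j = q + (j - q) := by omega
  rw [hji] at hw
  exact hbad (j - q) (by omega) (pv_occ_chars hU hw)

-- ---- the marker tokens never overlap a cut, except "UPDATE" under "Edit: "/"EDIT" ----

lemma pv_CF1 : ∀ t ∈ ["Edit: ".toList, "EDIT".toList, "update".toList, "Update".toList],
    ∀ w ∈ ([] : List (List Char)) ++ ["Edit: ".toList, "EDIT".toList, "update".toList, "Update".toList],
      pvNoCross w t := by decide

lemma pv_CF2 : ∀ t ∈ ["edit".toList, "update,".toList, "update:".toList],
    ∀ w ∈ ["Edit: ".toList, "EDIT".toList, "update".toList, "Update".toList, "UPDATE".toList,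
           "edit".toList, "update,".toList, "update:".toList],
      pvNoCross w t := by decide

lemma pv_CFU : ∀ w ∈ ["Edit: ".toList, "EDIT".toList, "update".toList, "Update".toList],
    ∀ k < 6, 0 < k →
      (k = 5 ∧ (w = "Edit: ".toList ∨ w = "EDIT".toList)) ∨
      (¬(("UPDATE".toList).drop k <+: w) ∧ ¬(w <+: ("UPDATE".toList).drop k)) := by decide

-- ---- the two ports, reduced to character-level folds ----

lemma pv_A_toList (text : String) :
    (clean_post_body_py text).toList
      = text.toList.take ((pvParts.map String.toList).foldl (fun m t => pvNxt text.toList t m) text.toList.length) := by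
  exact pv_foldA text.toList pvParts (by decide) text text.toList.length (le_refl _) (by simp)

lemma pv_altfold_bridge (text : String) (toks : List String) : ∀ b : Int,
    toks.foldl (fun best token =>
        let i := PySem.Str.find text token
        if i ≠ -1 ∧ (best = -1 ∨ i < best) then i else best) b
      = (toks.map String.toList).foldl (fun best t =>
          if PySem.Chars.find text.toList t ≠ -1 ∧ (best = -1 ∨ PySem.Chars.find text.toList t < best)
          then PySem.Chars.find text.toList t else best) b := by
  induction toks with
  | nil => intro b; rfl
  | cons tok toks ih =>
    intro b
    simp only [List.foldl_cons, List.map_cons]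
    rw [show PySem.Str.find text tok = PySem.Chars.find text.toList tok.toList from by simp]
    exact ih _

lemma pv_B_toList (text : String) :
    (clean_post_body_py_alt text).toList
      = text.toList.take ((pvParts.map String.toList).foldl (fun m t => min m (pvEff text.toList t)) text.toList.length) := by
  have hrfl : clean_post_body_py_alt text =
      (if (pvParts.foldl (fun best token =>
            let i := PySem.Str.find text token
            if i ≠ -1 ∧ (best = -1 ∨ i < best) then i else best) (-1)) = -1 then text
       else PySem.Str.slice text none (some (pvParts.foldl (fun best token =>
            let i := PySem.Str.find text token
            if i ≠ -1 ∧ (best = -1 ∨ i < best) then i else best) (-1)))) := rfl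
  rw [hrfl, pv_altfold_bridge text pvParts (-1)]
  rcases pv_best_spec text.toList (pvParts.map String.toList) (by decide) with ⟨hb, hm⟩ | ⟨hb, hm⟩
  · rw [hb, hm]
    simp
  · rw [hm]
    split_ifs with h
    · omega
    · rw [PySem.Str.toList_slice, PySem.Chars.slice_eq_listSlice, PySem.List.slice_to text.toList hb]

def pvG1 : List (List Char) := ["Edit: ".toList, "EDIT".toList, "update".toList, "Update".toList]
def pvU : List Char := "UPDATE".toList
def pvG2 : List (List Char) := ["edit".toList, "update,".toList, "update:".toList]

lemma pv_D_iff (text : String) : D_clean_post_body_py text ↔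
    (0 ≤ PySem.Chars.find text.toList pvU ∧
     ("Edit: ".toList <+: text.toList.drop ((PySem.Chars.find text.toList pvU).toNat + 5) ∨
      "EDIT".toList <+: text.toList.drop ((PySem.Chars.find text.toList pvU).toNat + 5)) ∧
     (∀ t ∈ pvParts, PySem.Chars.find text.toList t.toList = -1
        ∨ PySem.Chars.find text.toList pvU ≤ PySem.Chars.find text.toList t.toList)) := by
  unfold D_clean_post_body_py
  have hfU : PySem.Str.find text "UPDATE" = PySem.Chars.find text.toList pvU := by
    simp [pvU]
  rw [hfU]
  apply and_congr_right
  intro h0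
  apply and_congr
  · have hsl : ∀ p : String, PySem.Str.startswith
        (PySem.Str.slice text (some (PySem.Chars.find text.toList pvU + 5)) none) p = true
        ↔ p.toList <+: text.toList.drop ((PySem.Chars.find text.toList pvU).toNat + 5) := by
      intro p
      rw [show PySem.Str.startswith (PySem.Str.slice text (some (PySem.Chars.find text.toList pvU + 5)) none) p
            = PySem.Chars.startswith (PySem.Str.slice text (some (PySem.Chars.find text.toList pvU + 5)) none).toList p.toList from by simp]
      rw [PySem.Str.toList_slice, PySem.Chars.slice_eq_listSlice,
        PySem.List.slice_from text.toList (by omega : (0:Int) ≤ PySem.Chars.find text.toList pvU + 5)]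
      rw [show (PySem.Chars.find text.toList pvU + 5).toNat = (PySem.Chars.find text.toList pvU).toNat + 5 from by omega]
      exact PySem.Chars.startswith_iff _ _
    rw [hsl "Edit: ", hsl "EDIT"]
  · constructor
    · intro h t ht
      have := h t ht
      rwa [show PySem.Str.find text t = PySem.Chars.find text.toList t.toList from by simp] at this
    · intro h t ht
      have := h t ht
      rwa [show PySem.Str.find text t = PySem.Chars.find text.toList t.toList from by simp]

lemma pv_stuck5 {cs : List Char} {m : Nat} {w : List Char} (hw1 : w ∈ pvG1)
    (hw2 : w <+: cs.drop m) (hin : PySem.Chars.isIn pvU cs = true)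
    (h1 : (PySem.Chars.find cs pvU).toNat < m) (h2 : m < (PySem.Chars.find cs pvU).toNat + 6) :
    m = (PySem.Chars.find cs pvU).toNat + 5 ∧ (w = "Edit: ".toList ∨ w = "EDIT".toList) := by
  have h0 : 0 ≤ PySem.Chars.find cs pvU :=
    (PySem.Chars.find_nonneg_iff cs pvU).mpr ((PySem.Chars.isIn_iff_infix pvU cs).mp hin)
  have hs := PySem.Chars.find_spec h0
  have hdk : pvU.drop (m - (PySem.Chars.find cs pvU).toNat) <+: cs.drop m := by
    have := hs.1.drop (m - (PySem.Chars.find cs pvU).toNat)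
    rwa [List.drop_drop, show (PySem.Chars.find cs pvU).toNat + (m - (PySem.Chars.find cs pvU).toNat) = m from by omega] at this
  have hCFU := pv_CFU w hw1 (m - (PySem.Chars.find cs pvU).toNat) (by omega) (by omega)
  rcases hCFU with ⟨hk, hww⟩ | ⟨hn1, hn2⟩
  · exact ⟨by omega, hww⟩
  · rcases List.prefix_or_prefix_of_prefix hdk hw2 with hor | hor
    · exact absurd hor hn1
    · exact absurd hor hn2

lemma pv_G1_effs_ge {cs : List Char} {t : List Char} (ht : t ∈ pvG1)
    (hq : ∀ u ∈ pvG1, PySem.Chars.isIn u cs = true →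
      (PySem.Chars.find cs pvU).toNat ≤ (PySem.Chars.find cs u).toNat)
    (hU : pvU <+: cs.drop (PySem.Chars.find cs pvU).toNat) :
    (PySem.Chars.find cs pvU).toNat + 5 ≤ pvEff cs t := by
  have hlen : (PySem.Chars.find cs pvU).toNat + 6 ≤ cs.length := by
    have := pv_prefix_drop_len hU (by decide)
    simpa using this
  unfold pvEff
  by_cases hin : PySem.Chars.isIn t cs = true
  · rw [if_pos hin]
    have h0 : 0 ≤ PySem.Chars.find cs t :=
      (PySem.Chars.find_nonneg_iff cs t).mpr ((PySem.Chars.isIn_iff_infix t cs).mp hin)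
    have hocc := (PySem.Chars.find_spec h0).1
    have hge := hq t ht hin
    by_contra hcon
    refine pv_no_occ (b := 5) hU hocc hge (by omega) (by omega) ?_
    fin_cases ht
    · decide
    · decide
    · decide
    · decide
  · rw [if_neg (by simp [hin])]
    omega

lemma pv_G2_effs_ge {cs : List Char} {t : List Char} (ht : t ∈ pvG2)
    (hq : PySem.Chars.isIn t cs = true →
      (PySem.Chars.find cs pvU).toNat ≤ (PySem.Chars.find cs t).toNat)
    (hU : pvU <+: cs.drop (PySem.Chars.find cs pvU).toNat) :
    (PySem.Chars.find cs pvU).toNat + 6 ≤ pvEff cs t := by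
  have hlen : (PySem.Chars.find cs pvU).toNat + 6 ≤ cs.length := by
    have := pv_prefix_drop_len hU (by decide)
    simpa using this
  unfold pvEff
  by_cases hin : PySem.Chars.isIn t cs = true
  · rw [if_pos hin]
    have h0 : 0 ≤ PySem.Chars.find cs t :=
      (PySem.Chars.find_nonneg_iff cs t).mpr ((PySem.Chars.isIn_iff_infix t cs).mp hin)
    have hocc := (PySem.Chars.find_spec h0).1
    have hge := hq hin
    by_contra hcon
    refine pv_no_occ (b := 6) hU hocc hge (by omega) (by omega) ?_
    fin_cases ht
    · decide
    · decide
    · decide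
  · rw [if_neg (by simp [hin])]
    omega

lemma pv_unchanged (text : String) (hD : ¬ D_clean_post_body_py text) :
    clean_post_body_py text = clean_post_body_py_alt text := by
  apply String.toList_inj.mp
  rw [pv_A_toList, pv_B_toList]
  rw [show pvParts.map String.toList = pvG1 ++ pvU :: pvG2 from rfl]
  simp only [List.foldl_append, List.foldl_cons]
  obtain ⟨he1, hle1, hinv1⟩ := pv_run text.toList pvG1 [] text.toList.length (le_refl _) (by decide)
    (Or.inl rfl) (fun t ht w hw => pv_CF1 t ht w hw)
  have hinv1' : List.foldl (fun m t => pvNxt text.toList t m) text.toList.length pvG1 = text.toList.length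
      ∨ ∃ w ∈ pvG1, w <+: text.toList.drop (List.foldl (fun m t => pvNxt text.toList t m) text.toList.length pvG1) := by
    rcases hinv1 with h | ⟨w, hw1, hw2⟩
    · exact Or.inl h
    · exact Or.inr ⟨w, by simpa using hw1, hw2⟩
  set cs := text.toList with hcs
  set m4 := List.foldl (fun m t => pvNxt cs t m) cs.length pvG1 with hm4
  by_cases hstuck : PySem.Chars.isIn pvU cs = true ∧ (PySem.Chars.find cs pvU).toNat < m4
      ∧ m4 < (PySem.Chars.find cs pvU).toNat + 6
  · -- the crossing configuration: either D_ holds (excluded) or a later marker hides it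
    obtain ⟨hin5, hs1, hs2⟩ := hstuck
    have h05 : 0 ≤ PySem.Chars.find cs pvU :=
      (PySem.Chars.find_nonneg_iff cs pvU).mpr ((PySem.Chars.isIn_iff_infix pvU cs).mp hin5)
    have hU := (PySem.Chars.find_spec h05).1
    have hlen6 : (PySem.Chars.find cs pvU).toNat + 6 ≤ cs.length := by
      have h6 := pv_prefix_drop_len hU (by decide)
      rw [show pvU.length = 6 from rfl] at h6
      omega
    rcases hinv1' with hmlen | ⟨w, hw1, hw2⟩
    · omega
    · have hinv1'' : m4 = cs.length ∨ ∃ u ∈ pvG1, u <+: cs.drop m4 := Or.inr ⟨w, hw1, hw2⟩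
      obtain ⟨hm45, hw12⟩ := pv_stuck5 hw1 hw2 hin5 hs1 hs2
      -- D_'s first two clauses hold, so its third must fail
      have hc2 : ("Edit: ".toList <+: cs.drop ((PySem.Chars.find cs pvU).toNat + 5) ∨
          "EDIT".toList <+: cs.drop ((PySem.Chars.find cs pvU).toNat + 5)) := by
        rw [← hm45]
        rcases hw12 with h | h
        · exact Or.inl (h ▸ hw2)
        · exact Or.inr (h ▸ hw2)
      have hc3 : ¬(∀ t ∈ pvParts, PySem.Chars.find cs t.toList = -1
          ∨ PySem.Chars.find cs pvU ≤ PySem.Chars.find cs t.toList) :=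
        fun hc3 => hD ((pv_D_iff text).mpr ⟨h05, hc2, hc3⟩)
      simp only [not_forall, not_or] at hc3
      obtain ⟨tokS, hmem, hne1, hlt⟩ := hc3
      push_neg at hlt
      have hf0 : 0 ≤ PySem.Chars.find cs tokS.toList := by
        have := PySem.Chars.neg_one_le_find cs tokS.toList
        omega
      have hinT : PySem.Chars.isIn tokS.toList cs = true :=
        (PySem.Chars.isIn_iff_infix _ _).mpr ((PySem.Chars.find_nonneg_iff cs tokS.toList).mp hf0)
      have heffT : pvEff cs tokS.toList = (PySem.Chars.find cs tokS.toList).toNat := by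
        unfold pvEff; rw [if_pos hinT]
      have htNlt : (PySem.Chars.find cs tokS.toList).toNat < (PySem.Chars.find cs pvU).toNat := by omega
      -- the offending marker must be one checked after "UPDATE"
      have htok2 : tokS.toList ∈ pvG2 := by
        have hG1 : tokS.toList ∈ pvG1 → False := by
          intro hg1
          have := pv_foldmin_le_mem cs hg1 cs.length
          rw [← he1] at this
          omega
        have hU5 : tokS = "UPDATE" → False := by
          intro h; subst h
          have : PySem.Chars.find cs pvU < PySem.Chars.find cs pvU := hlt
          omega
        fin_cases hmem
        · exact absurd (by decide) hG1
        · exact absurd (by decide) hG1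
        · exact absurd (by decide) hG1
        · exact absurd (by decide) hG1
        · exact absurd rfl hU5
        · decide
        · decide
        · decide
      -- step 5 is a no-op on A's side
      have hm5 : pvNxt cs pvU m4 = m4 := by
        unfold pvNxt
        rw [if_neg (by
          rintro ⟨-, h⟩
          rw [show pvU.length = 6 from rfl] at h
          omega)]
      obtain ⟨he2, hle2, _⟩ := pv_run cs pvG2 (pvG1 ++ [pvU]) (pvNxt cs pvU m4)
        (pv_nxt_le_len hle1) (by decide) (pv_nxt_inv cs pvU pvG1 hinv1'')
        (by
          intro t ht w' hw'
          apply pv_CF2 t ht w'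
          rw [show (pvG1 ++ [pvU]) ++ pvG2
              = ["Edit: ".toList, "EDIT".toList, "update".toList, "Update".toList, "UPDATE".toList,
                 "edit".toList, "update,".toList, "update:".toList] from rfl] at hw'
          exact hw')
      have heff5 : pvEff cs pvU = (PySem.Chars.find cs pvU).toNat := by
        unfold pvEff; rw [if_pos hin5]
      rw [he2, hm5, ← he1, heff5]
      -- both folds over the tail collapse to the same value
      have hF5len : (PySem.Chars.find cs pvU).toNat ≤ cs.length := by omega
      have hminfold_le := pv_foldmin_le_mem cs htok2 cs.length
      have hsh1 : List.foldl (fun m t => min m (pvEff cs t)) m4 pvG2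
          = min m4 (List.foldl (fun m t => min m (pvEff cs t)) cs.length pvG2) := by
        conv_lhs => rw [show m4 = min m4 cs.length from by omega]
        exact pv_foldmin_shift cs pvG2 m4 cs.length
      have hsh2 : List.foldl (fun m t => min m (pvEff cs t))
            (min m4 (PySem.Chars.find cs pvU).toNat) pvG2
          = min (min m4 (PySem.Chars.find cs pvU).toNat)
              (List.foldl (fun m t => min m (pvEff cs t)) cs.length pvG2) := by
        conv_lhs => rw [show min m4 (PySem.Chars.find cs pvU).toNat
            = min (min m4 (PySem.Chars.find cs pvU).toNat) cs.length from by omega]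
        exact pv_foldmin_shift cs pvG2 _ cs.length
      rw [hsh1, hsh2]
      congr 1
      omega
  · -- no crossing: every step is a plain min
    have hns : ¬(PySem.Chars.isIn pvU cs = true ∧ (PySem.Chars.find cs pvU).toNat < m4
        ∧ m4 < (PySem.Chars.find cs pvU).toNat + pvU.length) := by
      rw [show pvU.length = 6 from rfl]
      exact hstuck
    have h5 := pv_nxt_notstuck cs pvU (by decide) hle1 hns
    obtain ⟨he2, hle2, _⟩ := pv_run cs pvG2 (pvG1 ++ [pvU]) (pvNxt cs pvU m4)
      (pv_nxt_le_len hle1) (by decide) (pv_nxt_inv cs pvU pvG1 hinv1')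
      (by
        intro t ht w' hw'
        apply pv_CF2 t ht w'
        rw [show (pvG1 ++ [pvU]) ++ pvG2
            = ["Edit: ".toList, "EDIT".toList, "update".toList, "Update".toList, "UPDATE".toList,
               "edit".toList, "update,".toList, "update:".toList] from rfl] at hw'
        exact hw')
    rw [he2, h5, he1]

lemma pv_tight (text : String) (hD : D_clean_post_body_py text) :
    clean_post_body_py text ≠ clean_post_body_py_alt text := by
  obtain ⟨h05, hc2, hc3⟩ := (pv_D_iff text).mp hD
  set cs := text.toList with hcs
  have hin5 : PySem.Chars.isIn pvU cs = true :=
    (PySem.Chars.isIn_iff_infix pvU cs).mpr ((PySem.Chars.find_nonneg_iff cs pvU).mp h05)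
  have hU := (PySem.Chars.find_spec h05).1
  have hlen6 : (PySem.Chars.find cs pvU).toNat + 6 ≤ cs.length := by
    have h6 := pv_prefix_drop_len hU (by decide)
    rw [show pvU.length = 6 from rfl] at h6
    omega
  have heff5 : pvEff cs pvU = (PySem.Chars.find cs pvU).toNat := by
    unfold pvEff; rw [if_pos hin5]
  have hq : ∀ uS ∈ pvParts, PySem.Chars.isIn uS.toList cs = true →
      (PySem.Chars.find cs pvU).toNat ≤ (PySem.Chars.find cs uS.toList).toNat := by
    intro uS hmem hin
    have h0 : 0 ≤ PySem.Chars.find cs uS.toList :=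
      (PySem.Chars.find_nonneg_iff cs uS.toList).mpr ((PySem.Chars.isIn_iff_infix uS.toList cs).mp hin)
    rcases hc3 uS hmem with h | h
    · omega
    · omega
  have hq1 : ∀ u ∈ pvG1, PySem.Chars.isIn u cs = true →
      (PySem.Chars.find cs pvU).toNat ≤ (PySem.Chars.find cs u).toNat := by
    intro u hu
    fin_cases hu
    · exact hq "Edit: " (by decide)
    · exact hq "EDIT" (by decide)
    · exact hq "update" (by decide)
    · exact hq "Update" (by decide)
  have hG1 : ∀ t ∈ pvG1, (PySem.Chars.find cs pvU).toNat + 5 ≤ pvEff cs t :=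
    fun t ht => pv_G1_effs_ge ht hq1 hU
  have hG2 : ∀ t ∈ pvG2, (PySem.Chars.find cs pvU).toNat + 6 ≤ pvEff cs t := by
    intro t ht
    refine pv_G2_effs_ge ht (fun hin => ?_) hU
    fin_cases ht
    · exact hq "edit" (by decide) hin
    · exact hq "update," (by decide) hin
    · exact hq "update:" (by decide) hin
  -- the overlapped "Edit: "/"EDIT" pins the first four markers' minimum to F5+5
  have hw0 : ∃ w0 ∈ pvG1, pvEff cs w0 ≤ (PySem.Chars.find cs pvU).toNat + 5 := by
    rcases hc2 with hw | hw
    · refine ⟨"Edit: ".toList, by decide, ?_⟩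
      have hin : PySem.Chars.isIn "Edit: ".toList cs = true :=
        (PySem.Chars.isIn_iff_infix _ _).mpr ((pv_infix_iff _ _).mpr ⟨_, hw⟩)
      have hle := pv_find_le hw
      unfold pvEff; rw [if_pos hin]; omega
    · refine ⟨"EDIT".toList, by decide, ?_⟩
      have hin : PySem.Chars.isIn "EDIT".toList cs = true :=
        (PySem.Chars.isIn_iff_infix _ _).mpr ((pv_infix_iff _ _).mpr ⟨_, hw⟩)
      have hle := pv_find_le hw
      unfold pvEff; rw [if_pos hin]; omega
  obtain ⟨w0, hw0m, hw0le⟩ := hw0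
  have hm4' : List.foldl (fun m t => min m (pvEff cs t)) cs.length pvG1
      = (PySem.Chars.find cs pvU).toNat + 5 := by
    have hle := pv_foldmin_le_mem cs hw0m cs.length
    have hge := pv_foldmin_ge cs (a := cs.length) (c := (PySem.Chars.find cs pvU).toNat + 5)
      (by omega) hG1
    omega
  -- A's side
  obtain ⟨he1, hle1, hinv1⟩ := pv_run cs pvG1 [] cs.length (le_refl _) (by decide)
    (Or.inl rfl) (fun t ht w hw => pv_CF1 t ht w hw)
  have hinv1'' : List.foldl (fun m t => pvNxt cs t m) cs.length pvG1 = cs.length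
      ∨ ∃ w ∈ pvG1, w <+: cs.drop (List.foldl (fun m t => pvNxt cs t m) cs.length pvG1) := by
    rcases hinv1 with h | ⟨w, hw1, hw2⟩
    · exact Or.inl h
    · exact Or.inr ⟨w, by simpa using hw1, hw2⟩
  have hm4 : List.foldl (fun m t => pvNxt cs t m) cs.length pvG1
      = (PySem.Chars.find cs pvU).toNat + 5 := by rw [he1, hm4']
  have hm5 : pvNxt cs pvU (List.foldl (fun m t => pvNxt cs t m) cs.length pvG1)
      = (PySem.Chars.find cs pvU).toNat + 5 := by
    rw [hm4]
    unfold pvNxt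
    rw [if_neg (by
      rintro ⟨-, h⟩
      rw [show pvU.length = 6 from rfl] at h
      omega)]
  obtain ⟨he2, hle2, _⟩ := pv_run cs pvG2 (pvG1 ++ [pvU])
    (pvNxt cs pvU (List.foldl (fun m t => pvNxt cs t m) cs.length pvG1))
    (pv_nxt_le_len hle1) (by decide) (pv_nxt_inv cs pvU pvG1 hinv1'')
    (by
      intro t ht w' hw'
      apply pv_CF2 t ht w'
      rw [show (pvG1 ++ [pvU]) ++ pvG2
          = ["Edit: ".toList, "EDIT".toList, "update".toList, "Update".toList, "UPDATE".toList,
             "edit".toList, "update,".toList, "update:".toList] from rfl] at hw'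
      exact hw')
  have hAfold : List.foldl (fun m t => pvNxt cs t m)
      (pvNxt cs pvU (List.foldl (fun m t => pvNxt cs t m) cs.length pvG1)) pvG2
      = (PySem.Chars.find cs pvU).toNat + 5 := by
    rw [he2, hm5]
    have hle := pv_foldmin_le_init cs pvG2 ((PySem.Chars.find cs pvU).toNat + 5)
    have hge := pv_foldmin_ge cs (a := (PySem.Chars.find cs pvU).toNat + 5)
      (c := (PySem.Chars.find cs pvU).toNat + 5) (le_refl _) (fun t ht => by have := hG2 t ht; omega)
    omega
  have hAtl : (clean_post_body_py text).toList = cs.take ((PySem.Chars.find cs pvU).toNat + 5) := by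
    rw [pv_A_toList, show pvParts.map String.toList = pvG1 ++ pvU :: pvG2 from rfl]
    simp only [List.foldl_append, List.foldl_cons]
    rw [hAfold]
  -- B's side
  have hBfold : List.foldl (fun m t => min m (pvEff cs t)) cs.length (pvParts.map String.toList)
      = (PySem.Chars.find cs pvU).toNat := by
    have hle : List.foldl (fun m t => min m (pvEff cs t)) cs.length (pvParts.map String.toList)
        ≤ pvEff cs pvU := pv_foldmin_le_mem cs (by decide) cs.length
    have hge := pv_foldmin_ge cs (ts := pvParts.map String.toList) (a := cs.length)
      (c := (PySem.Chars.find cs pvU).toNat) (by omega)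
      (by
        intro t ht
        rw [show pvParts.map String.toList = pvG1 ++ pvU :: pvG2 from rfl] at ht
        rcases List.mem_append.mp ht with h | h
        · have := hG1 t h; omega
        · rcases List.mem_cons.mp h with h' | h'
          · subst h'; rw [heff5]
          · have := hG2 t h'; omega)
    rw [heff5] at hle
    omega
  have hBtl : (clean_post_body_py_alt text).toList = cs.take (PySem.Chars.find cs pvU).toNat := by
    rw [pv_B_toList, hBfold]
  intro heq
  have h1 : (clean_post_body_py text).toList.length = (clean_post_body_py_alt text).toList.length := by
    rw [heq]
  rw [hAtl, hBtl] at h1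
  simp only [List.length_take] at h1
  omega


-- ===== VERDICT (by name: the statement is the Claim_ definition above) =====
theorem clean_post_body_py_spec : Claim_unchanged_clean_post_body_py := by
  intro text _
  unfold Spec_clean_post_body_py
  intro hD
  exact pv_unchanged text hD

theorem clean_post_body_py_changed : Claim_changed_clean_post_body_py := by
  unfold Claim_changed_clean_post_body_py; decide

theorem clean_post_body_py_tight : Claim_exact_clean_post_body_py := by
  intro text _ hD
  exact pv_tight text hD
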